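-- pv_equiv track=rewrite | github.com/jdbecerra/calendario_agroclimatico | app/api_cbr/cbr_cafe.py | agrupar_extras_B
-- ===== SOURCE A (Python) =====
-- def agrupar_extras_B(extras_B):
--     """
--     Agrupa las recomendaciones de B (kB) por 'categoria_b'
--     y elimina duplicados dentro de cada categoría.
--     """
--     grupos = {}
--     for e in extras_B:
--         cat = e.get("categoria_b") or "general"
--         txt = (e.get("texto") or "").strip()
--         if not txt:
--             continue
--         if cat not in grupos:
--             grupos[cat] = []
--         if txt not in grupos[cat]:
--             grupos[cat].append(txt)
--     return grupos
-- ===== SOURCE B (Python) =====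
-- def agrupar_extras_B(extras_B):
--     """
--     Normaliza primero todo a una lista plana de pares (categoria, texto),
--     y luego arma el resultado por categoria: para cada categoria distinta
--     (en orden de primera aparicion) re-filtra la lista plana y comprime
--     duplicados, en vez de construir el dict incrementalmente.
--     """
--     pairs = []
--     for e in extras_B:
--         cat = e.get("categoria_b") or "general"
--         txt = (e.get("texto") or "").strip()
--         if txt:
--             pairs.append((cat, txt))
--     return {c: list(dict.fromkeys(t for cc, t in pairs if cc == c))
--             for c in dict.fromkeys(c for c, _ in pairs)}
-- ===== Notes on version B (the rewrite author's own statement) =====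
-- stated objective: alternative
-- what changed: Instead of A's single pass that incrementally builds the dict with a per-element membership check, B first flattens the input to a plain list of (category, text) pairs and then constructs the whole result declaratively: for each distinct category (first-appearance order) it re-filters the flat pair list and compresses duplicates, so no dict is mutated during the scan.
import Mathlib
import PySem

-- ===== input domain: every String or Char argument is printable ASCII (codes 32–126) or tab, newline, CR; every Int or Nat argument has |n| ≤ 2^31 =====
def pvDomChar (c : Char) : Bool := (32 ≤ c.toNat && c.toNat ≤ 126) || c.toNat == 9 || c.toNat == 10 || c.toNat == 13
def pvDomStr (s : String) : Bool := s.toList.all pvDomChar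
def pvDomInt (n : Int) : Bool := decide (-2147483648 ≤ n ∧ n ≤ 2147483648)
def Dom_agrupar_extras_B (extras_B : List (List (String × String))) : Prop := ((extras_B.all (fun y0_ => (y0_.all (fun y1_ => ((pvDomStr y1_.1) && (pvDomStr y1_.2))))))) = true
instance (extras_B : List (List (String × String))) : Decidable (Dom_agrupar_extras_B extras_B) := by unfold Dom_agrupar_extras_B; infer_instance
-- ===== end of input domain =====

-- B flattens the input to a (category, text) pair list and then builds each category's bucket by re-filtering that list (alternative decomposition, no incremental dict).

-- ===== PORT A =====
def agrupar_extras_B (extras_B : List (List (String × String))) : List (String × List String) :=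
  (extras_B.foldl
    (fun grupos e =>
      let cat0 := (PySem.Dict.mk e).getD "categoria_b" ""
      let cat := if cat0 = "" then "general" else cat0
      let txt := PySem.Str.strip ((PySem.Dict.mk e).getD "texto" "")
      if txt = "" then grupos
      else
        let grupos1 := if grupos.contains cat then grupos else grupos.insert cat ([] : List String)
        let lst := grupos1.getD cat []
        if txt ∈ lst then grupos1 else grupos1.insert cat (lst ++ [txt]))
    PySem.Dict.empty).items

-- ===== PORT B =====
def agrupar_extras_B_alt (extras_B : List (List (String × String))) : List (String × List String) :=
  let pairs := extras_B.foldl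
    (fun acc e =>
      let cat0 := (PySem.Dict.mk e).getD "categoria_b" ""
      let cat := if cat0 = "" then "general" else cat0
      let txt := PySem.Str.strip ((PySem.Dict.mk e).getD "texto" "")
      if txt = "" then acc else acc ++ [(cat, txt)]) []
  (PySem.List.dedup (pairs.map Prod.fst)).map
    (fun c => (c, PySem.List.dedup ((pairs.filter (fun p => p.1 == c)).map Prod.snd)))

-- ===== PRECONDITION & SPEC =====
def Spec_agrupar_extras_B (extras_B : List (List (String × String))) (out : List (String × List String)) : Prop := out = agrupar_extras_B_alt extras_B
instance (extras_B : List (List (String × String))) (out : List (String × List String)) : Decidable (Spec_agrupar_extras_B extras_B out) := by unfold Spec_agrupar_extras_B; infer_instance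

-- ===== CLAIM (what is proved, stated in full; the proofs are below) =====
def Claim_equal_agrupar_extras_B : Prop := ∀ (extras_B : List (List (String × String))), Dom_agrupar_extras_B extras_B → Spec_agrupar_extras_B extras_B (agrupar_extras_B extras_B)

-- ===== LEMMAS AND PROOFS =====

-- B's result, as a function of the flat pair list
def pvS (ps : List (String × String)) : List (String × List String) :=
  (PySem.List.dedup (ps.map Prod.fst)).map
    (fun c => (c, PySem.List.dedup ((ps.filter (fun p => p.1 == c)).map Prod.snd)))

-- A's loop step on the items list: append txt to cat's bucket if not already there
def pvUpdA (L : List (String × List String)) (cat txt : String) : List (String × List String) :=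
  match L with
  | [] => [(cat, [txt])]
  | p :: rest =>
      if p.1 = cat then (p.1, if txt ∈ p.2 then p.2 else p.2 ++ [txt]) :: rest
      else p :: pvUpdA rest cat txt

theorem pv_map_replace_id (L : List (String × List String)) (cat : String) (w : List String)
    (h : ∀ p ∈ L, p.1 ≠ cat) :
    L.map (fun p => if p.1 = cat then (cat, w) else p) = L := by
  induction L with
  | nil => rfl
  | cons p rest ih =>
      simp only [List.map_cons]
      rw [if_neg (h p (by simp)), ih (fun q hq => h q (by simp [hq]))]

theorem pv_stepA_items (L : List (String × List String)) (cat txt : String)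
    (hnd : (L.map Prod.fst).Nodup) :
    (let grupos1 := if (PySem.Dict.mk L).contains cat then PySem.Dict.mk L
                    else (PySem.Dict.mk L).insert cat ([] : List String)
     let lst := grupos1.getD cat []
     (if txt ∈ lst then grupos1 else grupos1.insert cat (lst ++ [txt])).items)
      = pvUpdA L cat txt := by
  induction L with
  | nil =>
      simp [PySem.Dict.insert, PySem.Dict.contains, PySem.Dict.getD,
        PySem.Dict.get?, pvUpdA]
  | cons p rest ih =>
      obtain ⟨k, v⟩ := p
      simp only [List.map_cons, List.nodup_cons] at hnd
      by_cases hk : k = cat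
      · subst hk
        have hrest : ∀ q ∈ rest, q.1 ≠ k := by
          intro q hq hq1; exact hnd.1 (hq1 ▸ List.mem_map_of_mem hq)
        by_cases hm : txt ∈ v
        · simp [PySem.Dict.insert, PySem.Dict.contains, PySem.Dict.getD,
            PySem.Dict.get?, pvUpdA, hm]
        · simp [PySem.Dict.insert, PySem.Dict.contains, PySem.Dict.getD,
            PySem.Dict.get?, pvUpdA, hm, pv_map_replace_id rest k (v ++ [txt]) hrest]
      · have ihr := ih hnd.2
        rw [show pvUpdA ((k, v) :: rest) cat txt = (k, v) :: pvUpdA rest cat txt from by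
          simp [pvUpdA, hk], ← ihr]
        simp only [PySem.Dict.insert, PySem.Dict.contains, PySem.Dict.getD,
          PySem.Dict.get?, PySem.Dict.items, List.any_cons,
          show (k == cat) = false from by simp [hk], Bool.false_or]
        by_cases hc : rest.any (fun p => p.1 == cat) = true
        · simp only [hc, if_true]
          rw [show List.find? (fun p => p.1 == cat) ((k, v) :: rest)
                = List.find? (fun p => p.1 == cat) rest from by
              simp [List.find?_cons, hk]]
          by_cases hm : txt ∈ (Option.map (fun x => x.2)
              (rest.find? (fun p => p.1 == cat))).getD []
          · simp [hm]
          · simp [hm, List.any_cons, hc, hk]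
        · simp only [Bool.not_eq_true] at hc
          have hnone : rest.find? (fun p => p.1 == cat) = none := by
            rw [List.find?_eq_none]; intro p hp
            simpa using List.any_eq_false.mp hc p hp
          have hrest2 : ∀ q ∈ rest, q.1 ≠ cat := by
            intro q hq; simpa using List.any_eq_false.mp hc q hq
          simp only [hc, Bool.false_eq_true, if_false]
          rw [show List.find? (fun p => p.1 == cat) (((k, v) :: rest) ++ [(cat, ([] : List String))])
                = some (cat, ([] : List String)) from by
              simp [List.find?_cons, List.find?_append, hk, hnone]]
          simp [List.any_cons, hc, hk, hnone, pv_map_replace_id rest cat ([] ++ [txt]) hrest2]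

-- pvUpdA on a keyed map: updates the matching entry (or appends a fresh one)
theorem pv_updA_map (L : List String) (hnd : L.Nodup) (b : String → List String) (c t : String) :
    pvUpdA (L.map (fun c' => (c', b c'))) c t
      = if c ∈ L
        then L.map (fun c' => if c' = c then (c, if t ∈ b c then b c else b c ++ [t]) else (c', b c'))
        else L.map (fun c' => (c', b c')) ++ [(c, [t])] := by
  induction L with
  | nil => simp [pvUpdA]
  | cons k rest ih =>
      simp only [List.nodup_cons] at hnd
      by_cases hk : k = c
      · subst hk
        have : rest.map (fun c' => if c' = k then (k, if t ∈ b k then b k else b k ++ [t]) else (c', b c'))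
            = rest.map (fun c' => (c', b c')) := by
          apply List.map_congr_left; intro x hx
          rw [if_neg]; intro hxk; exact hnd.1 (hxk ▸ hx)
        simp [pvUpdA, this]
      · have ihr := ih hnd.2
        by_cases hc : c ∈ rest
        · simp [pvUpdA, hk, hc, ihr, Ne.symm hk]
        · simp [pvUpdA, hk, hc, ihr, Ne.symm hk]

-- appending one pair to the flat list is exactly A's update step on B's result
theorem pv_S_snoc (ps : List (String × String)) (c t : String) :
    pvS (ps ++ [(c, t)]) = pvUpdA (pvS ps) c t := by
  have hnd : (PySem.List.dedup (ps.map Prod.fst)).Nodup := PySem.List.nodup_dedup _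
  unfold pvS
  rw [pv_updA_map _ hnd _ c t]
  by_cases hc : c ∈ ps.map Prod.fst
  · have hmem : c ∈ PySem.List.dedup (ps.map Prod.fst) := by
      rw [PySem.List.mem_dedup]; exact hc
    have hkeys : PySem.List.dedup ((ps ++ [(c, t)]).map Prod.fst)
        = PySem.List.dedup (ps.map Prod.fst) := by
      simp [PySem.List.dedup_eq_ofList, PySem.Set.ofList_append_singleton,
        PySem.Set.add, PySem.Set.contains, hc]
    rw [hkeys, if_pos hmem]
    apply List.map_congr_left
    intro c' _
    by_cases hc' : c' = c
    · subst hc'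
      have : (ps ++ [(c', t)]).filter (fun p => p.1 == c') = ps.filter (fun p => p.1 == c') ++ [(c', t)] := by
        simp [List.filter_append]
      rw [this]
      simp only [List.map_append, List.map_cons, List.map_nil, if_pos rfl]
      by_cases hm : t ∈ PySem.List.dedup ((ps.filter (fun p => p.1 == c')).map Prod.snd)
      · have hm' : t ∈ (ps.filter (fun p => p.1 == c')).map Prod.snd := by
          rwa [PySem.List.mem_dedup] at hm
        simp [PySem.List.dedup_eq_ofList, PySem.Set.ofList_append_singleton,
          PySem.Set.add, PySem.Set.contains, hm', hm]
      · have hm' : t ∉ (ps.filter (fun p => p.1 == c')).map Prod.snd := by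
          rwa [PySem.List.mem_dedup] at hm
        simp [PySem.List.dedup_eq_ofList, PySem.Set.ofList_append_singleton,
          PySem.Set.add, PySem.Set.contains, hm', hm]
    · have : (ps ++ [(c, t)]).filter (fun p => p.1 == c') = ps.filter (fun p => p.1 == c') := by
        simp [List.filter_append, Ne.symm hc', hc']
      rw [this, if_neg hc']
  · have hmem : c ∉ PySem.List.dedup (ps.map Prod.fst) := by
      rw [PySem.List.mem_dedup]; exact hc
    have hkeys : PySem.List.dedup ((ps ++ [(c, t)]).map Prod.fst)
        = PySem.List.dedup (ps.map Prod.fst) ++ [c] := by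
      simp [PySem.List.dedup_eq_ofList, PySem.Set.ofList_append_singleton,
        PySem.Set.add, PySem.Set.contains, hc]
    have hfil : ps.filter (fun p => p.1 == c) = [] := by
      rw [List.filter_eq_nil_iff]
      intro p hp hbc
      apply hc
      have hpc : p.1 = c := by simpa using hbc
      exact hpc ▸ List.mem_map_of_mem hp
    rw [hkeys, if_neg hmem, List.map_append]
    congr 1
    · apply List.map_congr_left
      intro c' hc'
      have hne : c' ≠ c := fun h => hmem (h ▸ hc')
      have : (ps ++ [(c, t)]).filter (fun p => p.1 == c') = ps.filter (fun p => p.1 == c') := by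
        simp [List.filter_append, hne, Ne.symm hne]
      rw [this]
    · have : (ps ++ [(c, t)]).filter (fun p => p.1 == c) = [(c, t)] := by
        simp [List.filter_append, hfil]
      simp [this, hfil, PySem.Set.ofList_cons, PySem.Set.ofList_nil, PySem.Set.discard]

-- main invariant: running A's loop from state pvS ps over es yields pvS of the extended pair list
theorem pv_loop_invariant (es : List (List (String × String))) :
    ∀ (ps : List (String × String)),
    (es.foldl
      (fun grupos e =>
        let cat0 := (PySem.Dict.mk e).getD "categoria_b" ""
        let cat := if cat0 = "" then "general" else cat0
        let txt := PySem.Str.strip ((PySem.Dict.mk e).getD "texto" "")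
        if txt = "" then grupos
        else
          let grupos1 := if grupos.contains cat then grupos else grupos.insert cat ([] : List String)
          let lst := grupos1.getD cat []
          if txt ∈ lst then grupos1 else grupos1.insert cat (lst ++ [txt]))
      (PySem.Dict.mk (pvS ps))).items
    = pvS (es.foldl
        (fun acc e =>
          let cat0 := (PySem.Dict.mk e).getD "categoria_b" ""
          let cat := if cat0 = "" then "general" else cat0
          let txt := PySem.Str.strip ((PySem.Dict.mk e).getD "texto" "")
          if txt = "" then acc else acc ++ [(cat, txt)]) ps) := by
  induction es with
  | nil => intro ps; rfl
  | cons e es ih =>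
      intro ps
      simp only [List.foldl_cons]
      set cat0 := (PySem.Dict.mk e).getD "categoria_b" "" with hcat0
      set cat := if cat0 = "" then "general" else cat0 with hcat
      set txt := PySem.Str.strip ((PySem.Dict.mk e).getD "texto" "") with htxt
      by_cases ht : txt = ""
      · simp only [ht, if_true]
        exact ih ps
      · simp only [if_neg ht]
        have hndS : ((pvS ps).map Prod.fst).Nodup := by
          have h1 : (pvS ps).map Prod.fst = PySem.List.dedup (ps.map Prod.fst) := by
            simp [pvS, List.map_map, Function.comp_def]
          rw [h1]; exact PySem.List.nodup_dedup _
        have hstate :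
            (let grupos1 := if (PySem.Dict.mk (pvS ps)).contains cat then PySem.Dict.mk (pvS ps)
                            else (PySem.Dict.mk (pvS ps)).insert cat ([] : List String)
             let lst := grupos1.getD cat []
             if txt ∈ lst then grupos1 else grupos1.insert cat (lst ++ [txt]))
            = PySem.Dict.mk (pvS (ps ++ [(cat, txt)])) := by
          apply congrArg PySem.Dict.mk
          rw [pv_S_snoc]
          exact pv_stepA_items (pvS ps) cat txt hndS
        rw [hstate]
        exact ih (ps ++ [(cat, txt)])

-- ===== VERDICT (by name: the statement is the Claim_ definition above) =====
theorem agrupar_extras_B_spec : Claim_equal_agrupar_extras_B := by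
  intro extras_B _
  unfold Spec_agrupar_extras_B agrupar_extras_B agrupar_extras_B_alt
  simpa [pvS] using pv_loop_invariant extras_B []
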